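-- pv_equiv track=rewrite | github.com/repository-rapidos/drinbd_n_repeat_seas | all_in_one.py | add_seasonality
-- ===== SOURCE A (Python) =====
-- from collections import deque
--
-- def add_seasonality(original_series, seasonal_fragment, seasons_2_add):
-- 	original_series = list(original_series)
-- 	for _ in range(len(seasonal_fragment)):
-- 		original_last_values = list(deque(original_series, len(seasonal_fragment)))
-- 		right_original_series = original_series
-- 		original_series = original_series[:-1]
-- 		checker = original_last_values == seasonal_fragment
-- 		if checker:
-- 			break
-- 	series_with_more_seasons = right_original_series + (seasonal_fragment*seasons_2_add)
-- 	return series_with_more_seasons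
-- ===== SOURCE B (Python) =====
-- def add_seasonality(original_series, seasonal_fragment, seasons_2_add):
--     s = list(original_series)
--     n = len(s)
--     m = len(seasonal_fragment)
--     cut = m - 1
--     for k in range(m):
--         if n - k >= m and s[n - k - m : n - k] == seasonal_fragment:
--             cut = k
--             break
--     head = s[:max(n - cut, 0)]
--     return head + seasonal_fragment * seasons_2_add
-- ===== Notes on version B (the rewrite author's own statement) =====
-- stated objective: alternative
-- what changed: Instead of re-copying the whole series and its last-m deque on every trim step, B scans offsets k=0..m-1 comparing only the m-element tail slice at each offset to find the cut point, then builds the result once (the shared output fragment*seasons_2_add dominates the runtime, so no speed is claimed).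
import Mathlib
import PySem

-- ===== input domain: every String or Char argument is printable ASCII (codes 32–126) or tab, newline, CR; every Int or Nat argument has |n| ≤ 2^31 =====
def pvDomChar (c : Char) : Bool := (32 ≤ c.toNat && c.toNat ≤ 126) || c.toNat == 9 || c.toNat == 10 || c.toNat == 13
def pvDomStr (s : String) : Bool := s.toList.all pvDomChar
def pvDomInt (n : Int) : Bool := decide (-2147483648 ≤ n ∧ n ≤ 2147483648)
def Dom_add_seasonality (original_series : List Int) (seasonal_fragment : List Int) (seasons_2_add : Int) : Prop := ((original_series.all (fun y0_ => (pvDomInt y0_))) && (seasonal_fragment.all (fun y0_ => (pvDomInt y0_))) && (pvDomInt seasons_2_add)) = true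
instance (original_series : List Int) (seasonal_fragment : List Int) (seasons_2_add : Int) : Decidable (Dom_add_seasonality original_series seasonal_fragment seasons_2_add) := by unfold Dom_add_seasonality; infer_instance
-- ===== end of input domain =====

-- B finds the trim offset by comparing only m-element tail slices instead of copying the whole
-- series (and its deque) on every iteration; equivalence of return values is proved on nonempty
-- seasonal_fragment (A raises UnboundLocalError on an empty one).

-- ===== PORT A =====
-- loop of A: state = (original_series, right_original_series); fuel = remaining range iterations.
-- 'deque(xs, m)' → xs.drop (xs.length - m) (last min(len,m) elements); 'xs[:-1]' → xs.dropLast.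
def add_seasonality_loop (sf : List Int) : Nat → List Int → List Int → List Int
  | 0, _series, right => right
  | fuel + 1, series, _right =>
      let original_last_values := series.drop (series.length - sf.length)
      let right' := series
      let series' := series.dropLast
      if original_last_values = sf then right'
      else add_seasonality_loop sf fuel series' right'

def add_seasonality (original_series : List Int) (seasonal_fragment : List Int) (seasons_2_add : Int) : List Int :=
  -- initial 'right' is [] : in Python the name is unbound, reachable only when seasonal_fragment = []
  -- (excluded by Pre_).  'fragment * n' → flatten (replicate n.toNat fragment) (n ≤ 0 gives []).
  let right := add_seasonality_loop seasonal_fragment seasonal_fragment.length original_series []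
  right ++ (List.replicate seasons_2_add.toNat seasonal_fragment).flatten

-- ===== PORT B =====
-- find the first k < m with n-k >= m and s[n-k-m : n-k] == fragment, default m-1;
-- the for-loop over range(m) is ported with fuel = remaining iterations (fuel + k = m)
def add_seasonality_cut (s sf : List Int) (n m : Nat) : Nat → Nat → Nat
  | 0, _k => m - 1
  | fuel + 1, k =>
      if (n : Int) - k ≥ m ∧
         PySem.List.slice s (some ((n : Int) - k - m)) (some ((n : Int) - k)) = sf
      then k else add_seasonality_cut s sf n m fuel (k + 1)

def add_seasonality_alt (original_series : List Int) (seasonal_fragment : List Int) (seasons_2_add : Int) : List Int :=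
  let s := original_series
  let n := s.length
  let m := seasonal_fragment.length
  let cut := add_seasonality_cut s seasonal_fragment n m m 0
  let head := PySem.List.slice s none (some (max ((n : Int) - cut) 0))
  head ++ (List.replicate seasons_2_add.toNat seasonal_fragment).flatten

-- ===== PRECONDITION & SPEC =====
-- Pre_ excludes exactly the inputs with empty seasonal_fragment, on which A raises
-- UnboundLocalError (right_original_series is never assigned).
def Pre_add_seasonality (original_series : List Int) (seasonal_fragment : List Int) (seasons_2_add : Int) : Prop :=
  seasonal_fragment ≠ []
instance (original_series : List Int) (seasonal_fragment : List Int) (seasons_2_add : Int) : Decidable (Pre_add_seasonality original_series seasonal_fragment seasons_2_add) := by unfold Pre_add_seasonality; infer_instance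
def pvWitness_add_seasonality : List Int × List Int × Int := ([5, 1, 2, 1, 2], [1, 2], 2)

def Spec_add_seasonality (original_series : List Int) (seasonal_fragment : List Int) (seasons_2_add : Int) (out : List Int) : Prop := out = add_seasonality_alt original_series seasonal_fragment seasons_2_add
instance (original_series : List Int) (seasonal_fragment : List Int) (seasons_2_add : Int) (out : List Int) : Decidable (Spec_add_seasonality original_series seasonal_fragment seasons_2_add out) := by unfold Spec_add_seasonality; infer_instance

-- ===== CLAIM (what is proved, stated in full; the proofs are below) =====
def Claim_equal_add_seasonality : Prop := ∀ (original_series : List Int) (seasonal_fragment : List Int) (seasons_2_add : Int), Dom_add_seasonality original_series seasonal_fragment seasons_2_add → Pre_add_seasonality original_series seasonal_fragment seasons_2_add → Spec_add_seasonality original_series seasonal_fragment seasons_2_add (add_seasonality original_series seasonal_fragment seasons_2_add)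
-- ===== LEMMAS AND PROOFS =====

-- the series after k trims is a take
theorem take_dropLast_step (os : List Int) (k : Nat) :
    (os.take (os.length - k)).dropLast = os.take (os.length - (k + 1)) := by
  rw [List.dropLast_eq_take, List.take_take, List.length_take]
  congr 1
  omega

-- A's match condition at trim count k equals B's slice condition at offset k
theorem match_iff_cond (os sf : List Int) (k : Nat) (hm : sf ≠ []) :
    ((os.take (os.length - k)).drop ((os.take (os.length - k)).length - sf.length) = sf)
      ↔ ((os.length : Int) - k ≥ sf.length ∧
         PySem.List.slice os (some ((os.length : Int) - k - sf.length)) (some ((os.length : Int) - k)) = sf) := by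
  set n := os.length with hn
  set m := sf.length with hmlen
  have hm1 : 1 ≤ m := by
    cases sf with
    | nil => exact absurd rfl hm
    | cons a t => simp [hmlen]
  by_cases hge : k + m ≤ n
  · -- in range: both sides are the same sublist
    have h1 : ((n : Int) - k - m) = ((n - k - m : Nat) : Int) := by omega
    have h2 : ((n : Int) - k) = ((n - k : Nat) : Int) := by omega
    rw [h1, h2, PySem.List.slice_natCast]
    have hlen : (os.take (n - k)).length = n - k := by
      rw [List.length_take]; omega
    rw [hlen, List.drop_take]
    constructor
    · intro h; exact ⟨by omega, h⟩
    · intro h; exact h.2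
  · -- out of range: LHS list is too short to equal sf, RHS condition is false
    constructor
    · intro h
      have := congrArg List.length h
      simp [hn] at this
      omega
    · intro h
      have := h.1
      omega

-- main loop lemma: with fuel + k = m, A's loop from the k-times-trimmed series returns the
-- (cut)-times-trimmed series, where cut = add_seasonality_cut … fuel k
theorem loop_eq_cut (os sf : List Int) (hm : sf ≠ []) :
    ∀ (fuel k : Nat), fuel + k = sf.length →
      ∀ right, (fuel = 0 → right = os.take (os.length - (sf.length - 1))) →
      add_seasonality_loop sf fuel (os.take (os.length - k)) right
        = os.take (os.length - add_seasonality_cut os sf os.length sf.length fuel k) := by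
  intro fuel
  induction fuel with
  | zero =>
    intro k hk right hr
    rw [add_seasonality_loop, hr rfl, add_seasonality_cut]
  | succ n ih =>
    intro k hk right hr
    rw [add_seasonality_loop, add_seasonality_cut]
    by_cases hmatch : (os.take (os.length - k)).drop ((os.take (os.length - k)).length - sf.length) = sf
    · have hcond := (match_iff_cond os sf k hm).mp hmatch
      rw [if_pos hmatch, if_pos hcond]
    · have hcond : ¬ ((os.length : Int) - k ≥ sf.length ∧
          PySem.List.slice os (some ((os.length : Int) - k - sf.length)) (some ((os.length : Int) - k)) = sf) :=
        fun h => hmatch ((match_iff_cond os sf k hm).mpr h)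
      rw [if_neg hmatch, if_neg hcond, take_dropLast_step]
      exact ih (k + 1) (by omega) _ (fun h0 => by rw [h0] at hk; congr 1; omega)

-- B's clamped head slice is the corresponding take
theorem head_eq_take (os : List Int) (c : Nat) :
    PySem.List.slice os none (some (max ((os.length : Int) - c) 0))
      = os.take (os.length - c) := by
  have hmax : max ((os.length : Int) - c) 0 = (((os.length - c : Nat)) : Int) := by
    omega
  rw [hmax, PySem.List.slice_to_natCast]

-- ===== VERDICT (by name: the statement is the Claim_ definition above) =====
theorem add_seasonality_spec : Claim_equal_add_seasonality := by
  intro os sf s2a _dom hpre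
  unfold Spec_add_seasonality
  show add_seasonality_loop sf sf.length os [] ++ (List.replicate s2a.toNat sf).flatten
      = PySem.List.slice os none
          (some (max ((os.length : Int) - (add_seasonality_cut os sf os.length sf.length sf.length 0 : Nat)) 0))
        ++ (List.replicate s2a.toNat sf).flatten
  congr 1
  have hm1 : 1 ≤ sf.length := by
    cases sf with
    | nil => exact absurd rfl hpre
    | cons a t => simp
  calc add_seasonality_loop sf sf.length os []
      = add_seasonality_loop sf sf.length (os.take (os.length - 0)) [] := by simp
    _ = os.take (os.length - add_seasonality_cut os sf os.length sf.length sf.length 0) :=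
        loop_eq_cut os sf hpre sf.length 0 (by omega) [] (fun h => by omega)
    _ = PySem.List.slice os none
          (some (max ((os.length : Int) - (add_seasonality_cut os sf os.length sf.length sf.length 0 : Nat)) 0)) :=
        (head_eq_take os _).symm
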